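-- pv_equiv track=rewrite | github.com/pypi-data/pypi-mirror-398 | packages/intrascan/intrascan-0.1.1.tar.gz/intrascan-0.1.1/intrascan/extractors.py | _split_json_path
-- ===== SOURCE A (Python) =====
-- from typing import List, Dict, Optional, Any
--
-- def _split_json_path(query: str) -> List[str]:
--     """Split JSON path into parts"""
--     parts = []
--     current = ""
--     in_bracket = False
--
--     for char in query:
--         if char == '[':
--             in_bracket = True
--             current += char
--         elif char == ']':
--             in_bracket = False
--             current += char
--         elif char == '.' and not in_bracket:
--             if current:
--                 parts.append(current)
--             current = ""
--         else:
--             current += char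
--
--     if current:
--         parts.append(current)
--
--     return parts
-- ===== SOURCE B (Python) =====
-- from typing import List
--
-- def _update_bracket(flag: bool, piece: str) -> bool:
--     for ch in piece:
--         if ch == '[':
--             flag = True
--         elif ch == ']':
--             flag = False
--     return flag
--
-- def _split_json_path(query: str) -> List[str]:
--     """Split JSON path into parts: split on '.' first, then rejoin the pieces
--     whose preceding dot was inside a bracket."""
--     pieces = query.split('.')
--     parts: List[str] = []
--     current = pieces[0]
--     in_bracket = _update_bracket(False, pieces[0])
--     for piece in pieces[1:]:
--         if in_bracket:
--             current += '.' + piece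
--         else:
--             if current:
--                 parts.append(current)
--             current = piece
--         in_bracket = _update_bracket(in_bracket, piece)
--     if current:
--         parts.append(current)
--     return parts
-- ===== Notes on version B (the rewrite author's own statement) =====
-- stated objective: faster
-- what changed: B splits the query on the dot character first with str.split (a C-level primitive) and then folds the pieces back together, deciding per piece via a last-bracket-wins flag whether the preceding separator was inside a bracket, instead of A's per-character Python loop with repeated string concatenation.
import Mathlib
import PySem

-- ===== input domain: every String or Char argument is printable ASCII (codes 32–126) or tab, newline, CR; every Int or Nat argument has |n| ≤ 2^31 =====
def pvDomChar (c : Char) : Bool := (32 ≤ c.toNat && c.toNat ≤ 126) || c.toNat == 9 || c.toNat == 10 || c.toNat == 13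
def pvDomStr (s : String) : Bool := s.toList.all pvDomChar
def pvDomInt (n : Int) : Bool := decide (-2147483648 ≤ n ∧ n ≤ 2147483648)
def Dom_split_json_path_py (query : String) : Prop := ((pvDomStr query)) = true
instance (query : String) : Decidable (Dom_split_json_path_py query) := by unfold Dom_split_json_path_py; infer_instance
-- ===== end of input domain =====

-- B replaces A's per-character scan by str.split('.') followed by a piece-rejoining fold with a bracket flag; a timing run measured B faster (constant factor).

-- ===== PORT A =====
-- state: (parts, current as List Char, in_bracket)
def stepA (st : List String × List Char × Bool) (c : Char) : List String × List Char × Bool :=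
  if c = '[' then (st.1, st.2.1 ++ [c], true)
  else if c = ']' then (st.1, st.2.1 ++ [c], false)
  else if c = '.' ∧ st.2.2 = false then
    ((if st.2.1 = [] then st.1 else st.1 ++ [String.mk st.2.1]), [], st.2.2)
  else (st.1, st.2.1 ++ [c], st.2.2)

def split_json_path_py (query : String) : List String :=
  let st := query.toList.foldl stepA ([], [], false)
  if st.2.1 = [] then st.1 else st.1 ++ [String.mk st.2.1]

-- ===== PORT B =====
-- _update_bracket: scan the piece, '[' sets the flag, ']' clears it
def updateBracket (flag : Bool) (piece : List Char) : Bool :=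
  piece.foldl (fun f c => if c = '[' then true else if c = ']' then false else f) flag

def stepB (st : List String × List Char × Bool) (piece : List Char) : List String × List Char × Bool :=
  if st.2.2 then (st.1, st.2.1 ++ '.' :: piece, updateBracket st.2.2 piece)
  else ((if st.2.1 = [] then st.1 else st.1 ++ [String.mk st.2.1]), piece, updateBracket st.2.2 piece)

def split_json_path_py_alt (query : String) : List String :=
  let pieces := PySem.Chars.splitOn query.toList ['.']   -- query.split('.')
  let p0 := pieces.headD []                               -- pieces[0] (split never returns [])
  let st := pieces.tail.foldl stepB ([], p0, updateBracket false p0)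
  if st.2.1 = [] then st.1 else st.1 ++ [String.mk st.2.1]

-- ===== PRECONDITION & SPEC =====
def Spec_split_json_path_py (query : String) (out : List String) : Prop := out = split_json_path_py_alt query
instance (query : String) (out : List String) : Decidable (Spec_split_json_path_py query out) := by unfold Spec_split_json_path_py; infer_instance

-- ===== CLAIM (what is proved, stated in full; the proofs are below) =====
def Claim_equal_split_json_path_py : Prop := ∀ (query : String), Dom_split_json_path_py query → Spec_split_json_path_py query (split_json_path_py query)

-- ===== LEMMAS AND PROOFS =====

-- (head, tail) of splitting a char list on '.'
def mySplit : List Char → List Char × List (List Char)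
  | [] => ([], [])
  | c :: cs =>
    let p := mySplit cs
    if c = '.' then ([], p.1 :: p.2) else (c :: p.1, p.2)

theorem splitOn_go_eq (fuel : Nat) : ∀ (l cur : List Char) (acc : List (List Char)),
    l.length < fuel →
    PySem.Chars.splitOn.go ['.'] fuel l cur acc
      = acc.reverse ++ (cur.reverse ++ (mySplit l).1) :: (mySplit l).2 := by
  induction fuel with
  | zero => intro l cur acc h; omega
  | succ fuel ih =>
    intro l cur acc h
    cases l with
    | nil => simp [PySem.Chars.splitOn.go, mySplit]
    | cons c rest =>
      rw [PySem.Chars.splitOn.go]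
      simp only [List.length_cons] at h
      by_cases hc : c = '.'
      · subst hc
        have hpre : List.isPrefixOf ['.'] ('.' :: rest) = true := by
          simp [List.isPrefixOf]
        rw [if_pos hpre]
        rw [show List.drop (['.'] : List Char).length ('.' :: rest) = rest from rfl]
        rw [ih rest [] (cur.reverse :: acc) (by omega)]
        simp [mySplit]
      · have hpre : List.isPrefixOf ['.'] (c :: rest) = false := by
          simp [List.isPrefixOf]
          exact fun h => hc h.symm
        rw [if_neg (by simp [hpre])]
        rw [ih rest (c :: cur) acc (by omega)]
        simp [mySplit, hc]

theorem splitOn_eq (l : List Char) :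
    PySem.Chars.splitOn l ['.'] = (mySplit l).1 :: (mySplit l).2 := by
  have := splitOn_go_eq (l.length + 1) l [] [] (by omega)
  simpa [PySem.Chars.splitOn] using this

theorem main_lemma : ∀ (cs : List Char) (parts : List String) (cur : List Char) (ib : Bool),
    cs.foldl stepA (parts, cur, ib)
      = (mySplit cs).2.foldl stepB (parts, cur ++ (mySplit cs).1, updateBracket ib (mySplit cs).1) := by
  intro cs
  induction cs with
  | nil => intro parts cur ib; simp [mySplit, updateBracket]
  | cons c rest ih =>
    intro parts cur ib
    by_cases hc : c = '.'
    · subst hc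
      cases ib with
      | true =>
        rw [List.foldl_cons, show stepA (parts, cur, true) '.' = (parts, cur ++ ['.'], true) from by
          simp [stepA]]
        rw [ih]
        rcases hsp : mySplit rest with ⟨h1, t1⟩
        simp [mySplit, hsp, stepB, updateBracket]
      | false =>
        rw [List.foldl_cons, show stepA (parts, cur, false) '.'
              = ((if cur = [] then parts else parts ++ [String.mk cur]), [], false) from by
          simp [stepA]]
        rw [ih]
        rcases hsp : mySplit rest with ⟨h1, t1⟩
        simp [mySplit, hsp, stepB, updateBracket]
    · rw [List.foldl_cons]
      have hstep : stepA (parts, cur, ib) c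
          = (parts, cur ++ [c],
             if c = '[' then true else if c = ']' then false else ib) := by
        by_cases h1 : c = '['
        · simp [stepA, h1]
        · by_cases h2 : c = ']'
          · simp [stepA, h1, h2]
          · simp [stepA, h1, h2, hc]
      rw [hstep, ih]
      simp only [mySplit, if_neg hc]
      rcases hsp : mySplit rest with ⟨h1, t1⟩
      simp only [hsp]
      have hub : updateBracket ib (c :: h1)
          = updateBracket (if c = '[' then true else if c = ']' then false else ib) h1 := by
        simp [updateBracket]
      rw [hub]
      simp

-- ===== VERDICT (by name: the statement is the Claim_ definition above) =====
theorem split_json_path_py_spec : Claim_equal_split_json_path_py := by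
  intro query _hd
  unfold Spec_split_json_path_py split_json_path_py split_json_path_py_alt
  rw [splitOn_eq, main_lemma]
  simp [updateBracket]
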